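-- pv_equiv track=rewrite | github.com/Matesxs/GAN-Playground | visualize_conv_activations.py | calculate_grid
-- ===== SOURCE A (Python) =====
-- def calculate_grid(num_of_images):
--   row_size = num_of_images
--   col_size = 1
--
--   while True:
--     if (row_size / 2) < (col_size * 2): break
--     row_size = row_size // 2
--     col_size *= 2
--
--   return col_size, row_size
-- ===== SOURCE B (Python) =====
-- def calculate_grid(num_of_images):
--   if num_of_images < 4:
--     return 1, num_of_images
--   k = (num_of_images.bit_length() - 1) // 2
--   return 2 ** k, num_of_images >> k
-- ===== Notes on version B (the rewrite author's own statement) =====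
-- stated objective: alternative
-- what changed: Replaces A's while-loop of repeated floor-halvings with a closed form: when at least one halving happens, the number of halvings k is computed directly from the bit length as (n.bit_length() - 1) // 2 and B returns (2**k, n >> k); inputs below the loop's entry threshold (including zero and negatives) return (1, n) immediately, matching A's immediate break. O(log n) loop iterations become O(1) arithmetic, though both are far too fast to time.
import Mathlib
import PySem

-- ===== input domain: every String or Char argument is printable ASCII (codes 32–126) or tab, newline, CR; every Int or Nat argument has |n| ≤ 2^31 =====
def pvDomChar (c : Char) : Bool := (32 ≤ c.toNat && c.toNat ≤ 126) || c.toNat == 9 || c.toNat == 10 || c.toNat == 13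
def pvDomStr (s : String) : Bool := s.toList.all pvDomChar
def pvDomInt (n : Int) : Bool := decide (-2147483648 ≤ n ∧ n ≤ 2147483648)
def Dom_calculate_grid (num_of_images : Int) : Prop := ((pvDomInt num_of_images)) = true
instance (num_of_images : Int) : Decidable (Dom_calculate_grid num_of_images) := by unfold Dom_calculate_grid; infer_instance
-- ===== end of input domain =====

-- B replaces A's repeated-halving loop by a closed form computed from the bit length (objective: alternative).

-- ===== PORT A =====
-- A's 'while True' loop. The float comparison (row_size / 2) < (col_size * 2) is exact for
-- |row_size| ≤ 2^31 and equivalent over the rationals to row_size < 4 * col_size.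
-- The Prop argument hcol records A's loop invariant (col_size starts at 1 and only doubles);
-- it is needed only to justify termination and does not change the computation.
def calculate_grid_loop (row_size col_size : Int) (hcol : 1 ≤ col_size) : Int × Int :=
  if row_size < 4 * col_size then (col_size, row_size)
  else calculate_grid_loop (PySem.Int.floordiv row_size 2) (col_size * 2) (by omega)
termination_by row_size.toNat
decreasing_by
  rw [PySem.Int.floordiv_eq_ediv_of_pos (by omega)]
  omega

def calculate_grid (num_of_images : Int) : Int × Int :=
  calculate_grid_loop num_of_images 1 (by norm_num)

-- ===== PORT B =====
-- 'num_of_images >> k' is Int's arithmetic shift right '>>>', exactly Python's '>>'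
def calculate_grid_alt (num_of_images : Int) : Int × Int :=
  if num_of_images < 4 then (1, num_of_images)
  else
    let k := (PySem.Int.bitLength num_of_images - 1) / 2
    ((2 : Int) ^ k, num_of_images >>> k)

-- ===== PRECONDITION & SPEC =====
def Spec_calculate_grid (num_of_images : Int) (out : Int × Int) : Prop := out = calculate_grid_alt num_of_images
instance (num_of_images : Int) (out : Int × Int) : Decidable (Spec_calculate_grid num_of_images out) := by unfold Spec_calculate_grid; infer_instance

-- ===== CLAIM (what is proved, stated in full; the proofs are below) =====
def Claim_equal_calculate_grid : Prop := ∀ (num_of_images : Int), Dom_calculate_grid num_of_images → Spec_calculate_grid num_of_images (calculate_grid num_of_images)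

-- ===== LEMMAS AND PROOFS =====

lemma two_pow_pos_int (i : Nat) : (1:Int) ≤ (2:Int)^i := one_le_pow₀ (by norm_num)

-- After A's loop has run i times on an input m ≥ 0, the state is (m / 2^i, 2^i); if the loop
-- stops after exactly K more iterations (the two arithmetic hypotheses), the result is
-- (2^(K+i), m / 2^(K+i)).
lemma loop_eq : ∀ (K i m : Nat),
    m < 2 ^ (2*(K+i)+2) → (K = 0 ∨ 2 ^ (2*(K+i)) ≤ m) →
    calculate_grid_loop ((m / 2^i : Nat) : Int) ((2:Int)^i) (two_pow_pos_int i)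
      = ((2:Int)^(K+i), ((m / 2^(K+i) : Nat) : Int)) := by
  intro K
  induction K with
  | zero =>
    intro i m hlt _
    rw [calculate_grid_loop]
    have hcond : ((m / 2^i : Nat) : Int) < 4 * (2:Int)^i := by
      have h1 : m / 2^i < 2^(i+2) := by
        apply Nat.div_lt_iff_lt_mul (Nat.two_pow_pos _) |>.mpr
        calc m < 2 ^ (2*(0+i)+2) := hlt
          _ ≤ 2^(i+2) * 2^i := by rw [← pow_add]; apply Nat.pow_le_pow_right <;> omega
      calc ((m / 2^i : Nat) : Int) < ((2^(i+2) : Nat) : Int) := by exact_mod_cast h1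
        _ = 4 * (2:Int)^i := by push_cast [pow_add]; ring
    rw [if_pos hcond]
    norm_num
  | succ K ih =>
    intro i m hlt hge
    have hge' : 2 ^ (2*(K+1+i)) ≤ m := hge.resolve_left (by omega)
    rw [calculate_grid_loop]
    have hcond : ¬ (((m / 2^i : Nat) : Int) < 4 * (2:Int)^i) := by
      have h1 : 2^(i+2) ≤ m / 2^i := by
        apply (Nat.le_div_iff_mul_le (Nat.two_pow_pos _)).mpr
        calc 2^(i+2) * 2^i = 2^(2*i+2) := by rw [← pow_add]; ring_nf
          _ ≤ 2^(2*(K+1+i)) := by apply Nat.pow_le_pow_right <;> omega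
          _ ≤ m := hge'
      push Not
      calc 4 * (2:Int)^i = ((2^(i+2) : Nat) : Int) := by push_cast [pow_add]; ring
        _ ≤ ((m / 2^i : Nat) : Int) := by exact_mod_cast h1
    rw [if_neg hcond]
    have hdiv : PySem.Int.floordiv ((m / 2^i : Nat) : Int) 2 = ((m / 2^(i+1) : Nat) : Int) := by
      rw [PySem.Int.floordiv_eq_ediv_of_pos (by norm_num)]
      rw [show ((m / 2^i : Nat) : Int) / 2 = ((m / 2^i / 2 : Nat) : Int) from by
        exact_mod_cast (Int.natCast_div _ 2).symm]
      rw [Nat.div_div_eq_div_mul, ← pow_succ]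
    have hcol : (2:Int)^i * 2 = (2:Int)^(i+1) := by rw [pow_succ]
    have := ih (i+1) m (by rw [show 2*(K+(i+1))+2 = 2*(K+1+i)+2 by ring]; exact hlt)
      (Or.inr (by rw [show 2*(K+(i+1)) = 2*(K+1+i) by ring]; exact hge'))
    rw [show K+(i+1) = K+1+i by ring] at this
    simp only [hdiv, hcol]
    exact this

theorem main_eq (n : Int) : calculate_grid_loop n 1 (by norm_num) = calculate_grid_alt n := by
  unfold calculate_grid_alt
  by_cases h4 : n < 4
  · rw [calculate_grid_loop, if_pos (by omega), if_pos h4]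
  · rw [if_neg h4]
    have hn : 0 ≤ n := by omega
    obtain ⟨m, rfl⟩ := Int.eq_ofNat_of_zero_le hn
    have hm4 : 4 ≤ m := by exact_mod_cast not_lt.mp h4
    set b := PySem.Int.bitLength (m:Int) with hb
    have hub : m < 2 ^ b := by
      have := PySem.Int.lt_two_pow_bitLength (m:Int)
      simpa using this
    have hlb : 2 ^ (b-1) ≤ m := by
      have := PySem.Int.two_pow_bitLength_le (m:Int) (by exact_mod_cast (by omega : (m:Int) ≠ 0))
      simpa using this
    have hb3 : 3 ≤ b := by
      by_contra hc
      have : m < 2^b := hub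
      interval_cases b <;> omega
    set K := (b-1)/2 with hK
    have h1 : m < 2 ^ (2*(K+0)+2) := lt_of_lt_of_le hub (Nat.pow_le_pow_right (by norm_num) (by omega))
    have h2 : K = 0 ∨ 2 ^ (2*(K+0)) ≤ m :=
      Or.inr (le_trans (Nat.pow_le_pow_right (by norm_num) (by omega)) hlb)
    have h := loop_eq K 0 m h1 h2
    simp only [pow_zero, Nat.div_one, Nat.add_zero] at h
    rw [h]
    have hsh : ((m:Int)) >>> K = ((m / 2^K : Nat) : Int) := by
      rw [← Nat.shiftRight_eq_div_pow]
      simp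
    exact Prod.ext rfl hsh.symm

-- ===== VERDICT (by name: the statement is the Claim_ definition above) =====
theorem calculate_grid_spec : Claim_equal_calculate_grid := by
  intro n _
  unfold Spec_calculate_grid calculate_grid
  exact main_eq n
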